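-- pv_equiv track=rewrite | github.com/shaneholloman/huggingface-ai-trainer | src/autotrain/rendering/message_renderer.py | _fix_alternation
-- ===== SOURCE A (Python) =====
-- from typing import Any, Dict, List, Optional, Union
--
-- def _fix_alternation(messages: List[Dict[str, str]]) -> List[Dict[str, str]]:
--     """Fix messages to ensure proper user/assistant alternation.
--
--     This handles:
--     1. Consecutive same-role messages (merge them)
--     2. System → assistant without user in between (insert placeholder user)
--     3. Assistant at start without preceding user (insert placeholder user)
--
--     Args:
--         messages: List of message dicts with 'role' and 'content' keys
--
--     Returns:
--         Fixed messages with proper alternation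
--     """
--     if not messages:
--         return messages
--
--     # Step 1: Merge consecutive same-role messages
--     merged = []
--     for msg in messages:
--         if merged and merged[-1]["role"] == msg["role"]:
--             # Merge content with newline separator
--             merged[-1]["content"] = f"{merged[-1]['content']}\n{msg['content']}"
--         else:
--             merged.append(msg.copy())
--
--     # Step 2: Handle alternation issues
--     result = []
--     for i, msg in enumerate(merged):
--         role = msg["role"]
--
--         if role == "system":
--             result.append(msg)
--         elif role == "assistant":
--             # Check if we need to insert a user message before assistant
--             if not result or result[-1]["role"] in ("system", "assistant"):
--                 # Assistant without preceding user - insert placeholder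
--                 result.append({"role": "user", "content": "[Continued]"})
--             result.append(msg)
--         elif role == "user":
--             # Check for consecutive users (shouldn't happen after merge, but safety)
--             if result and result[-1]["role"] == "user":
--                 result[-1]["content"] = f"{result[-1]['content']}\n{msg['content']}"
--             else:
--                 result.append(msg)
--         else:
--             # Unknown role - just append
--             result.append(msg)
--
--     return result
-- ===== SOURCE B (Python) =====
-- from typing import Dict, List
--
--
-- def _fix_alternation(messages: List[Dict[str, str]]) -> List[Dict[str, str]]:
--     """Single fused pass: merge runs of the same role and fix alternation,
--     tracking the previous original message's role instead of building an
--     intermediate merged list."""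
--     if not messages:
--         return messages
--
--     result: List[Dict[str, str]] = []
--     prev_role = None
--     for msg in messages:
--         role = msg["role"]
--         if role == prev_role:
--             # Same role as the previous original message: merge into the
--             # last entry (which is that message's copy in result).
--             last = result[-1]
--             last["content"] = f"{last['content']}\n{msg['content']}"
--         elif role == "assistant" and (
--             not result or result[-1]["role"] in ("system", "assistant")
--         ):
--             result.append({"role": "user", "content": "[Continued]"})
--             result.append(msg.copy())
--         else:
--             result.append(msg.copy())
--         prev_role = role
--     return result
-- ===== Notes on version B (the rewrite author's own statement) =====
-- stated objective: simpler
-- what changed: Replaces A's two sequential passes (first merge consecutive same-role messages into an intermediate list, then walk it fixing alternation) with one fused pass that builds the result directly while tracking the previous original message's role.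
import Mathlib
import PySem

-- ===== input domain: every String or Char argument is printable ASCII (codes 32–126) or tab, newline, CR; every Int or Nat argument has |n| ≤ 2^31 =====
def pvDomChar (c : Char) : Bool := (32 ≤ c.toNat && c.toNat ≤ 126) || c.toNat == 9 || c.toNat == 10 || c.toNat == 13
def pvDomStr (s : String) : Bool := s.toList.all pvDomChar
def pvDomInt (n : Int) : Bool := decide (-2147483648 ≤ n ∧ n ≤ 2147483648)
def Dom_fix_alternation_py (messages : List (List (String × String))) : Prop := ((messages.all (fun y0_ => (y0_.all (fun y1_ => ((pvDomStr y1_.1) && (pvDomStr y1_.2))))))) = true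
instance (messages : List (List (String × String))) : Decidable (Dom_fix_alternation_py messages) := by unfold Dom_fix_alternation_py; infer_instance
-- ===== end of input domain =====

-- B replaces A's two passes (merge runs, then fix alternation) by one fused pass that tracks the
-- previous original message's role; same return value, no argument mutation in either program.

-- ===== PORT A =====
-- messages are Python dicts: each List (String × String) is turned into a PySem.Dict and back via .items

def pvRole (d : PySem.Dict String String) : String := d.getD "role" ""

def pvContent (d : PySem.Dict String String) : String := d.getD "content" ""

-- last["content"] = f"{last['content']}\n{msg_content}"
def pvExtend (d : PySem.Dict String String) (e : String) : PySem.Dict String String :=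
  d.insert "content" (pvContent d ++ "\n" ++ e)

-- Step 1 loop body of A
def pvStep1 (merged : List (PySem.Dict String String)) (msg : PySem.Dict String String) :
    List (PySem.Dict String String) :=
  match merged.getLast? with
  | some last =>
      if pvRole last = pvRole msg then merged.dropLast ++ [pvExtend last (pvContent msg)]
      else merged ++ [msg]
  | none => merged ++ [msg]

def pvPlaceholder : PySem.Dict String String :=
  PySem.Dict.ofList [("role", "user"), ("content", "[Continued]")]

-- Step 2 loop body of A
def pvStep2 (result : List (PySem.Dict String String)) (msg : PySem.Dict String String) :
    List (PySem.Dict String String) :=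
  let role := pvRole msg
  if role = "system" then result ++ [msg]
  else if role = "assistant" then
    (match result.getLast? with
     | none => result ++ [pvPlaceholder]
     | some last =>
         if pvRole last = "system" ∨ pvRole last = "assistant" then result ++ [pvPlaceholder]
         else result) ++ [msg]
  else if role = "user" then
    match result.getLast? with
    | some last =>
        if pvRole last = "user" then result.dropLast ++ [pvExtend last (pvContent msg)]
        else result ++ [msg]
    | none => result ++ [msg]
  else result ++ [msg]

def fix_alternation_py (messages : List (List (String × String))) : List (List (String × String)) :=
  if messages = [] then messages
  else
    let msgs := messages.map PySem.Dict.ofList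
    let merged := msgs.foldl pvStep1 []
    let result := merged.foldl pvStep2 []
    result.map (·.items)

-- ===== PORT B =====
-- B's merge: append msg's content into the last entry of result (the none branch is unreachable,
-- since prev_role is only ever set after at least one append)
def pvMergeB (result : List (PySem.Dict String String)) (msg : PySem.Dict String String) :
    List (PySem.Dict String String) :=
  match result.getLast? with
  | some last => result.dropLast ++ [pvExtend last (pvContent msg)]
  | none => result ++ [msg]

-- B's non-merge branches: placeholder before a dangling assistant, else plain append
def pvAppendB (result : List (PySem.Dict String String)) (msg : PySem.Dict String String) :
    List (PySem.Dict String String) :=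
  if pvRole msg = "assistant" then
    match result.getLast? with
    | none => result ++ [pvPlaceholder, msg]
    | some last =>
        if pvRole last = "system" ∨ pvRole last = "assistant" then result ++ [pvPlaceholder, msg]
        else result ++ [msg]
  else result ++ [msg]

-- B's single loop body over the state (result, prev_role)
def pvStepB (st : List (PySem.Dict String String) × Option String)
    (msg : PySem.Dict String String) : List (PySem.Dict String String) × Option String :=
  let role := pvRole msg
  if some role = st.2 then (pvMergeB st.1 msg, some role)
  else (pvAppendB st.1 msg, some role)

def fix_alternation_py_alt (messages : List (List (String × String))) :
    List (List (String × String)) :=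
  if messages = [] then messages
  else (((messages.map PySem.Dict.ofList).foldl pvStepB ([], none)).1).map (·.items)

-- ===== PRECONDITION & SPEC =====
-- Pre_ is exactly where A returns: every message has a "role" key, and both members of any
-- adjacent equal-role pair (the pairs the merge touches) have a "content" key; everywhere else
-- A (and B) raises KeyError.
def Pre_fix_alternation_py (messages : List (List (String × String))) : Prop :=
  (∀ m ∈ messages, "role" ∈ m.map Prod.fst) ∧
  ∀ p ∈ messages.zip messages.tail,
    (PySem.Dict.ofList p.1 : PySem.Dict String String).get? "role" =
        (PySem.Dict.ofList p.2 : PySem.Dict String String).get? "role" →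
      "content" ∈ p.1.map Prod.fst ∧ "content" ∈ p.2.map Prod.fst
instance (messages : List (List (String × String))) : Decidable (Pre_fix_alternation_py messages) := by
  unfold Pre_fix_alternation_py; infer_instance

def pvWitness_fix_alternation_py : (List (List (String × String))) :=
  [[("role", "assistant"), ("content", "hi")], [("role", "user"), ("content", "ok")]]

def Spec_fix_alternation_py (messages : List (List (String × String))) (out : List (List (String × String))) : Prop := out = fix_alternation_py_alt messages
instance (messages : List (List (String × String))) (out : List (List (String × String))) : Decidable (Spec_fix_alternation_py messages out) := by unfold Spec_fix_alternation_py; infer_instance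

-- ===== CLAIM (what is proved, stated in full; the proofs are below) =====
def Claim_equal_fix_alternation_py : Prop := ∀ (messages : List (List (String × String))), Dom_fix_alternation_py messages → Pre_fix_alternation_py messages → Spec_fix_alternation_py messages (fix_alternation_py messages)

-- ===== LEMMAS AND PROOFS =====

theorem pv_witness_ok :
    Dom_fix_alternation_py pvWitness_fix_alternation_py ∧
    Pre_fix_alternation_py pvWitness_fix_alternation_py := by decide

theorem pvRole_extend (d : PySem.Dict String String) (e : String) :
    pvRole (pvExtend d e) = pvRole d := by
  simp [pvRole, pvExtend, PySem.Dict.getD_insert]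

theorem pvContent_extend (d : PySem.Dict String String) (e : String) :
    pvContent (pvExtend d e) = pvContent d ++ "\n" ++ e := by
  simp [pvContent, pvExtend, PySem.Dict.getD_insert_self]

theorem pvExtend_extend (d : PySem.Dict String String) (e₁ e₂ : String) :
    pvExtend (pvExtend d e₁) e₂ = pvExtend d (e₁ ++ "\n" ++ e₂) := by
  simp [pvExtend, pvContent, PySem.Dict.insert_insert_self, String.append_assoc]

-- pvStep2 always ends with an element whose role is msg's role
theorem pvStep2_getLast (R : List (PySem.Dict String String)) (m : PySem.Dict String String) :
    ∃ l, (pvStep2 R m).getLast? = some l ∧ pvRole l = pvRole m := by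
  unfold pvStep2
  by_cases h1 : pvRole m = "system"
  · exact ⟨m, by simp [h1], rfl⟩
  · by_cases h2 : pvRole m = "assistant"
    · exact ⟨m, by simp [h2], rfl⟩
    · by_cases h3 : pvRole m = "user"
      · cases hL : R.getLast? with
        | none => exact ⟨m, by simp [h3, hL], rfl⟩
        | some last =>
          by_cases hu : pvRole last = "user"
          · exact ⟨pvExtend last (pvContent m),
              by simp [h3, hu], by rw [pvRole_extend, hu, h3]⟩
          · exact ⟨m, by simp [h3, hL, hu], rfl⟩
      · exact ⟨m, by simp [h1, h2, h3], rfl⟩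

-- main commutation: extending msg's content before running step 2 = merging into step 2's last entry
theorem pvStep2_extend (R : List (PySem.Dict String String)) (m msg : PySem.Dict String String) :
    pvStep2 R (pvExtend m (pvContent msg)) = pvMergeB (pvStep2 R m) msg := by
  have hrole : pvRole (pvExtend m (pvContent msg)) = pvRole m := pvRole_extend ..
  have hcont : pvContent (pvExtend m (pvContent msg)) = pvContent m ++ "\n" ++ pvContent msg :=
    pvContent_extend ..
  unfold pvStep2 pvMergeB
  by_cases h1 : pvRole m = "system"
  · simp [h1, hrole]
  · by_cases h2 : pvRole m = "assistant"
    · simp [h2, hrole]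
    · by_cases h3 : pvRole m = "user"
      · cases hL : R.getLast? with
        | none => simp [h3, hrole, hL]
        | some last =>
          by_cases hu : pvRole last = "user"
          · simp [h3, hrole, hu, hcont, pvExtend_extend]
          · simp [h3, hrole, hL, hu]
      · simp [h1, h2, h3, hrole]

-- where no user/user adjacency can occur, B's non-merge branch is exactly A's step 2 body
theorem pvAppendB_eq_step2 (R : List (PySem.Dict String String)) (m : PySem.Dict String String)
    (h : pvRole m = "user" → ∀ l, R.getLast? = some l → pvRole l ≠ "user") :
    pvAppendB R m = pvStep2 R m := by
  unfold pvAppendB pvStep2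
  by_cases h1 : pvRole m = "system"
  · simp [h1]
  · by_cases h2 : pvRole m = "assistant"
    · cases hL : R.getLast? with
      | none => simp [h2]
      | some last =>
        by_cases hs : pvRole last = "system" ∨ pvRole last = "assistant"
        · simp [h2, hs]
        · simp [h2, hs]
    · by_cases h3 : pvRole m = "user"
      · cases hL : R.getLast? with
        | none => simp [h3]
        | some last => simp [h3, h h3 last hL]
      · simp [h1, h2, h3]

def pvInv (M R : List (PySem.Dict String String)) (prev : Option String) : Prop :=
  R = M.foldl pvStep2 [] ∧
  ((M = [] ∧ R = [] ∧ prev = none) ∨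
   (∃ l l', M.getLast? = some l ∧ R.getLast? = some l' ∧ prev = some (pvRole l) ∧
     pvRole l' = pvRole l))

theorem pvInv_step (M R : List (PySem.Dict String String)) (prev : Option String)
    (m : PySem.Dict String String) (h : pvInv M R prev) :
    pvInv (pvStep1 M m) (pvStepB (R, prev) m).1 (pvStepB (R, prev) m).2 := by
  obtain ⟨hR, hcase⟩ := h
  by_cases hm : some (pvRole m) = prev
  · -- merge case
    rcases hcase with ⟨hM0, hR0, hprev⟩ | ⟨l, l', hMl, hRl, hprev, hrl⟩
    · rw [hprev] at hm; cases hm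
    · have hml : pvRole m = pvRole l := by
        rw [hprev] at hm; exact Option.some.inj hm
      obtain ⟨M', hM'⟩ := List.getLast?_eq_some_iff.mp hMl
      obtain ⟨R', hR'⟩ := List.getLast?_eq_some_iff.mp hRl
      have h1 : pvStep1 M m = M' ++ [pvExtend l (pvContent m)] := by
        unfold pvStep1; rw [hMl]; simp [hml.symm, hM']
      have hB : pvStepB (R, prev) m = (pvMergeB R m, some (pvRole m)) := by
        unfold pvStepB; simp [hm]
      have hfold : ((pvStep1 M m).foldl pvStep2 []) = pvMergeB R m := by
        rw [h1, List.foldl_append]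
        have : R = pvStep2 (M'.foldl pvStep2 []) l := by
          rw [hR, hM', List.foldl_append]; rfl
        simp only [List.foldl_cons, List.foldl_nil]
        rw [pvStep2_extend, ← this]
      refine ⟨by rw [hB, hfold], Or.inr ⟨pvExtend l (pvContent m), pvExtend l' (pvContent m), ?_, ?_, ?_, ?_⟩⟩
      · rw [h1]; simp
      · rw [hB]; unfold pvMergeB; rw [hRl]; simp [hR']
      · rw [hB, pvRole_extend, hml]
      · rw [pvRole_extend, pvRole_extend, hrl]
  · -- append case
    have h1 : pvStep1 M m = M ++ [m] := by
      unfold pvStep1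
      rcases hcase with ⟨hM0, hR0, hprev⟩ | ⟨l, l', hMl, hRl, hprev, hrl⟩
      · rw [hM0]; rfl
      · rw [hMl]
        have : pvRole l ≠ pvRole m := by
          intro he; exact hm (by rw [hprev, he])
        simp [this]
    have hB : pvStepB (R, prev) m = (pvAppendB R m, some (pvRole m)) := by
      unfold pvStepB; simp [hm]
    have happ : pvAppendB R m = pvStep2 R m := by
      apply pvAppendB_eq_step2
      intro hu l0 hl0
      rcases hcase with ⟨hM0, hR0, hprev⟩ | ⟨l, l', hMl, hRl, hprev, hrl⟩
      · rw [hR0] at hl0; cases hl0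
      · rw [hRl] at hl0
        have : l0 = l' := (Option.some.inj hl0).symm
        rw [this, hrl]
        intro he
        exact hm (by rw [hprev, he, hu])
    have hfold : ((pvStep1 M m).foldl pvStep2 []) = pvStep2 R m := by
      rw [h1, List.foldl_append, ← hR]; rfl
    obtain ⟨l2, hl2, hl2r⟩ := pvStep2_getLast R m
    refine ⟨by rw [hB, happ, hfold], Or.inr ⟨m, l2, ?_, ?_, by rw [hB], ?_⟩⟩
    · rw [h1]; simp
    · rw [hB]; simpa [happ] using hl2
    · exact hl2r

theorem pvInv_foldl (msgs : List (PySem.Dict String String)) :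
    ∀ M R prev, pvInv M R prev →
      pvInv (msgs.foldl pvStep1 M) (msgs.foldl pvStepB (R, prev)).1
        (msgs.foldl pvStepB (R, prev)).2 := by
  induction msgs with
  | nil => intro M R prev h; exact h
  | cons m msgs ih =>
      intro M R prev h
      have h' := pvInv_step M R prev m h
      simpa using ih _ _ _ h'

-- ===== VERDICT (by name: the statement is the Claim_ definition above) =====
theorem fix_alternation_py_spec : Claim_equal_fix_alternation_py := by
  intro messages _ _
  unfold Spec_fix_alternation_py fix_alternation_py fix_alternation_py_alt
  by_cases hne : messages = []
  · simp [hne]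
  · simp only [if_neg hne]
    have h := pvInv_foldl (messages.map PySem.Dict.ofList) [] [] none
      ⟨by simp, Or.inl ⟨rfl, rfl, rfl⟩⟩
    rw [h.1]
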